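-- pv_equiv track=rewrite | github.com/ryandroll/CS61A_Practice | hw03/hw03.py | pingpong
-- ===== SOURCE A (Python) =====
-- def pingpong(n):
--     """Return the nth element of the ping-pong sequence.
--
--     >>> pingpong(7)
--     7
--     >>> pingpong(8)
--     6
--     >>> pingpong(15)
--     1
--     >>> pingpong(21)
--     -1
--     >>> pingpong(22)
--     0
--     >>> pingpong(30)
--     6
--     >>> pingpong(68)
--     2
--     >>> pingpong(69)
--     1
--     >>> pingpong(70)
--     0
--     >>> pingpong(71)
--     1
--     >>> pingpong(72)
--     0
--     >>> pingpong(100)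
--     2
--     >>> from construct_check import check
--     >>> check(HW_SOURCE_FILE, 'pingpong', ['Assign', 'AugAssign'])
--     True
--     """
--     "*** YOUR CODE HERE ***"
--     def upordown(n):
--         '''
--         n - 1 to n True for plus one True for plus one
--         '''
--         if n == 2:
--             return True
--         elif (n - 1) % 7 == 0:
--             return not upordown(n - 1)
--         elif has_seven(n - 1):
--             return not upordown(n - 1)
--         else:
--             return upordown(n - 1)
--
--     if n == 1:
--         return 1
--     elif upordown(n):
--         return pingpong(n - 1) + 1
--     else:
--         return pingpong(n - 1) - 1
--
-- def has_seven(k):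
--     """Returns True if at least one of the digits of k is a 7, False otherwise.
--
--     >>> has_seven(3)
--     False
--     >>> has_seven(7)
--     True
--     >>> has_seven(2734)
--     True
--     >>> has_seven(2634)
--     False
--     >>> has_seven(734)
--     True
--     >>> has_seven(7777)
--     True
--     """
--     if k % 10 == 7:
--         return True
--     elif k < 10:
--         return False
--     else:
--         return has_seven(k // 10)
-- ===== SOURCE B (Python) =====
-- def pingpong(n):
--     x = 1
--     step = 1
--     for i in range(1, n):
--         if i % 7 == 0 or _digits_contain_seven(i):
--             step = -step
--         x += step
--     return x
--
-- def _digits_contain_seven(k):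
--     while k >= 10:
--         if k % 10 == 7:
--             return True
--         k //= 10
--     return k == 7
-- ===== Notes on version B (the rewrite author's own statement) =====
-- stated objective: faster
-- what changed: Replaces A's double recursion (pingpong(n) recursing on n-1 with upordown re-walking from n down to 2 at every level) by a single forward loop over range(1,n) tracking (value, direction) and flipping the direction at multiples of 7 or numbers containing the digit 7; the digit test is an iterative while loop instead of recursion.
import Mathlib
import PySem

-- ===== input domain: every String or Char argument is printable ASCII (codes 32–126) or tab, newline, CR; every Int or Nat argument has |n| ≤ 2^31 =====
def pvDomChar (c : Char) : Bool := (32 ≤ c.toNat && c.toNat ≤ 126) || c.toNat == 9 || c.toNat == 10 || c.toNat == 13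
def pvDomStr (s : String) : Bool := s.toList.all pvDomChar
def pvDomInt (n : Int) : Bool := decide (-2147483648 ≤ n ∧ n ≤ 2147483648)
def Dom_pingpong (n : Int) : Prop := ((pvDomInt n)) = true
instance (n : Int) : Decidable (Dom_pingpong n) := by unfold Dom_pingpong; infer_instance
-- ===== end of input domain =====

-- B replaces A's O(n^2) double recursion by a single forward loop tracking (value, direction); objective: faster (asymptotic).

-- ===== PORT A =====
-- has_seven, step for step (recursion on the digits; total: k < 10 branch stops non-positive k too)
def hasSevenA (k : Int) : Bool :=
  if PySem.Int.mod k 10 == 7 then true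
  else if k < 10 then false
  else hasSevenA (PySem.Int.floordiv k 10)
termination_by k.toNat
decreasing_by
  rename_i h1 h2
  simp at h2
  rw [PySem.Int.floordiv_eq_ediv_of_pos (by omega)]
  omega

-- upordown, step for step; Python diverges for n < 2 — the 'n < 2 → false' guard only makes it total (Pre_ keeps us away)
def upordownA (n : Int) : Bool :=
  if n == 2 then true
  else if n < 2 then false   -- totality guard: Python recurses forever here
  else if PySem.Int.mod (n - 1) 7 == 0 then ! upordownA (n - 1)
  else if hasSevenA (n - 1) then ! upordownA (n - 1)
  else upordownA (n - 1)
termination_by n.toNat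
decreasing_by all_goals omega

def pingpong (n : Int) : Int :=
  if n == 1 then 1
  else if n < 1 then 0   -- totality guard: Python recurses forever here
  else if upordownA n then pingpong (n - 1) + 1
  else pingpong (n - 1) - 1
termination_by n.toNat
decreasing_by all_goals omega

-- ===== PORT B =====
-- _digits_contain_seven: the while loop of Source B (peel digits while k >= 10, then test k == 7)
def digitsContainSeven (k : Int) : Bool :=
  if h : 10 ≤ k then
    if PySem.Int.mod k 10 == 7 then true
    else digitsContainSeven (PySem.Int.floordiv k 10)
  else k == 7
termination_by k.toNat
decreasing_by
  rw [PySem.Int.floordiv_eq_ediv_of_pos (by omega)]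
  omega

-- the single forward loop over range(1, n) with state (x, step)
def pingpong_alt (n : Int) : Int :=
  ((PySem.List.pyRange 1 n 1).foldl
    (fun (st : Int × Int) i =>
      let step := if PySem.Int.mod i 7 == 0 || digitsContainSeven i then -st.2 else st.2
      (st.1 + step, step))
    (1, 1)).1

-- ===== PRECONDITION & SPEC =====
-- Pre_ excludes n ≤ 0, where Python's A never returns (infinite recursion in upordown / pingpong).
def Pre_pingpong (n : Int) : Prop := 1 ≤ n
instance (n : Int) : Decidable (Pre_pingpong n) := by unfold Pre_pingpong; infer_instance
def pvWitness_pingpong : Int := 8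

def Spec_pingpong (n : Int) (out : Int) : Prop := out = pingpong_alt n
instance (n : Int) (out : Int) : Decidable (Spec_pingpong n out) := by unfold Spec_pingpong; infer_instance

-- ===== CLAIM (what is proved, stated in full; the proofs are below) =====
def Claim_equal_pingpong : Prop := ∀ (n : Int), Dom_pingpong n → Pre_pingpong n → Spec_pingpong n (pingpong n)

-- ===== LEMMAS AND PROOFS =====

-- the two digit tests agree on positive k
lemma hasSeven_eq (k : Int) (hk : 1 ≤ k) : hasSevenA k = digitsContainSeven k := by
  induction k using (fun {motive} => WellFounded.induction (measure Int.toNat).wf (C := motive)) with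
  | _ k ih =>
    rw [hasSevenA, digitsContainSeven]
    by_cases h10 : 10 ≤ k
    · simp only [if_neg (by omega : ¬ k < 10), dif_pos h10]
      have he : PySem.Int.mod k 10 = k % 10 := PySem.Int.mod_eq_emod_of_pos (by norm_num)
      by_cases hmod : k % 10 = 7
      · simp [he, hmod]
      · have hc : ¬ ((PySem.Int.mod k 10 == 7) = true) := by simp [he, hmod]
        simp only [if_neg hc]
        have hpos : (0:Int) < 10 := by norm_num
        have hdiv : 1 ≤ PySem.Int.floordiv k 10 := by
          rw [PySem.Int.floordiv_eq_ediv_of_pos hpos]; omega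
        have hlt : (PySem.Int.floordiv k 10).toNat < k.toNat := by
          rw [PySem.Int.floordiv_eq_ediv_of_pos hpos]; omega
        exact ih _ hlt hdiv
    · -- 1 ≤ k < 10: mod k 10 = k
      have hmod : k % 10 = k := Int.emod_eq_of_lt (by omega) (by omega)
      rw [dif_neg h10]
      by_cases h7 : k = 7
      · subst h7; simp [hmod, PySem.Int.mod_eq_emod_of_pos]
      · simp [hmod, h7, (by omega : k < 10), PySem.Int.mod_eq_emod_of_pos]

-- the flip condition of both programs, as one predicate
def flipAt (i : Int) : Bool := PySem.Int.mod i 7 == 0 || hasSevenA i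

lemma flip1 : flipAt 1 = false := by
  have h : hasSevenA 1 = false := by rw [hasSevenA]; decide
  simp [flipAt, h]

-- the direction A adds when going from n to n+1, as a signed int
def dirA (n : Int) : Int := if n ≤ 1 then 1 else if upordownA n then 1 else -1

lemma upordown_succ (n : Int) (hn : 2 ≤ n) :
    upordownA (n + 1) = (if flipAt n then ! upordownA n else upordownA n) := by
  rw [upordownA]
  have h2 : ¬ ((n + 1 : Int) == 2) = true := by simp; omega
  have h2' : ¬ (n + 1 < 2) := by omega
  simp only [h2, h2', if_false, add_sub_cancel_right]
  by_cases hd : (7:Int) ∣ n <;> by_cases hs : hasSevenA n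
  all_goals simp [flipAt, PySem.Int.mod_eq_zero_iff_dvd, hd, hs]

lemma dir_succ (n : Int) (hn : 1 ≤ n) :
    dirA (n + 1) = (if flipAt n then -dirA n else dirA n) := by
  by_cases h1 : n = 1
  · subst h1
    have hu : upordownA 2 = true := by rw [upordownA]; simp
    simp [dirA, flip1, hu]
  · have h2 : 2 ≤ n := by omega
    have h := upordown_succ n h2
    simp only [dirA, if_neg (show ¬ n + 1 ≤ 1 by omega), if_neg (show ¬ n ≤ 1 by omega), h]
    by_cases hf : flipAt n <;> by_cases hu : upordownA n
    all_goals simp [hf, hu]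

lemma pingpong_succ (n : Int) (hn : 1 ≤ n) :
    pingpong (n + 1) = pingpong n + dirA (n + 1) := by
  rw [pingpong]
  have h1 : ¬ (n + 1 == 1) := by simp; omega
  have h1' : ¬ (n + 1 < 1) := by omega
  simp only [h1, h1', if_false, add_sub_cancel_right, dirA,
    if_neg (by omega : ¬ n + 1 ≤ 1)]
  by_cases hu : upordownA (n + 1) <;> simp [hu] <;> ring

-- the loop body of B
def stepB (st : Int × Int) (i : Int) : Int × Int :=
  let step := if PySem.Int.mod i 7 == 0 || digitsContainSeven i then -st.2 else st.2
  (st.1 + step, step)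

lemma stepB_eq (st : Int × Int) (i : Int) (hi : 1 ≤ i) :
    stepB st i = (st.1 + (if flipAt i then -st.2 else st.2), if flipAt i then -st.2 else st.2) := by
  simp [stepB, flipAt, hasSeven_eq i hi]

-- loop invariant: after consuming range(1, m+1) the state is (pingpong (m+1), dirA (m+1))
lemma loop_inv (m : Nat) :
    (PySem.List.pyRange 1 ((m : Int) + 1) 1).foldl stepB (1, 1)
      = (pingpong ((m : Int) + 1), dirA ((m : Int) + 1)) := by
  induction m with
  | zero =>
      rw [PySem.List.pyRange_one_eq_nil (by norm_num)]
      have : pingpong 1 = 1 := by rw [pingpong]; simp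
      simp [this, dirA]
  | succ m ih =>
      have hm1 : (1:Int) ≤ (m:Int) + 1 := by omega
      have : ((m + 1 : Nat) : Int) + 1 = ((m : Int) + 1) + 1 := by push_cast; ring
      rw [this, PySem.List.pyRange_one_succ_right (by omega), List.foldl_append, ih]
      simp only [List.foldl_cons, List.foldl_nil]
      rw [stepB_eq _ _ hm1, pingpong_succ _ hm1, dir_succ _ hm1]

-- ===== VERDICT (by name: the statement is the Claim_ definition above) =====
theorem pingpong_spec : Claim_equal_pingpong := by
  intro n _ hpre
  unfold Spec_pingpong pingpong_alt
  have hpre' : (1:Int) ≤ n := hpre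
  obtain ⟨m, hm⟩ : ∃ m : Nat, n = (m : Int) + 1 :=
    ⟨(n - 1).toNat, by omega⟩
  subst hm
  show _ = ((PySem.List.pyRange 1 ((m:Int)+1) 1).foldl (fun st i => _) (1,1)).1
  have : (fun (st : Int × Int) i =>
      let step := if PySem.Int.mod i 7 == 0 || digitsContainSeven i then -st.2 else st.2
      (st.1 + step, step)) = stepB := rfl
  rw [this, loop_inv]
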